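-- pv_equiv track=rewrite | github.com/vinayvinu500/Hackerrank | Algorithms/Implementation/Modified_Karprekar_Numbers.py | kaprekarf_cycle
-- ===== SOURCE A (Python) =====
-- def kaprekarf(x: int, p: int, b: int) -> int:
--     beta = pow(x, 2) % pow(b, p)
--     alpha = (pow(x, 2) - beta) // pow(b, p)
--     y = alpha + beta
--     return y
--
-- def kaprekarf_cycle(x: int, p: int, b: int) -> list[int]:
--     seen = []
--     while x < pow(b, p) and x not in seen:
--         seen.append(x)
--         x = kaprekarf(x, p, b)
--     if x > pow(b, p):
--         return []
--     cycle = []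
--     while x not in cycle:
--         cycle.append(x)
--         x = kaprekarf(x, p, b)
--     return cycle
-- ===== SOURCE B (Python) =====
-- def kaprekarf_cycle(x: int, p: int, b: int) -> list[int]:
--     bound = pow(b, p)
--     seen = []
--     # record the whole trajectory below bound until a value repeats (or escapes)
--     while x < bound and x not in seen:
--         seen.append(x)
--         q, r = divmod(x * x, bound)
--         x = q + r
--     if x > bound:
--         return []
--     if x == bound:
--         # bound is a fixed point of the map, so the cycle found is just [bound]
--         return [bound]
--     # x repeated: the cycle is the recorded trajectory from x's first occurrence on
--     return seen[seen.index(x):]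
-- ===== Notes on version B (the rewrite author's own statement) =====
-- stated objective: simpler
-- what changed: B computes bound = pow(b,p) once and replaces A's entire second cycle-re-walking while loop by a slice of the recorded trajectory, seen[seen.index(x):], plus the fixed-point fact that the map sends bound to itself for the x == bound exit.
-- outside the precondition, e.g. on kaprekarf_cycle(5, -1, 2): A returns [], B returns []; on kaprekarf_cycle(0, -1, 2): A returns [0.0], B returns [0.0]
import Mathlib
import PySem

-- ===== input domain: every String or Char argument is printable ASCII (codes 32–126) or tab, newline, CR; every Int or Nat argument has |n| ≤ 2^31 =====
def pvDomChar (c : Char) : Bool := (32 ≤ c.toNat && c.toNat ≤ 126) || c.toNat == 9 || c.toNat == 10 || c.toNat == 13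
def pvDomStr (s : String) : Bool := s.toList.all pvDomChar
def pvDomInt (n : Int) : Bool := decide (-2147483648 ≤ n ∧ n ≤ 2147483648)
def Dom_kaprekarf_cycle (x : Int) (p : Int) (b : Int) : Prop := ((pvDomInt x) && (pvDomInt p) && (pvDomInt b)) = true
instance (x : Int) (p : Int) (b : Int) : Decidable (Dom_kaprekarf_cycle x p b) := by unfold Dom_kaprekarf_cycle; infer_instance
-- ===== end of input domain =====

-- B records the trajectory once and returns its stored suffix (plus the fixed-point fact for x == b**p),
-- instead of A's second while loop that re-walks the cycle; objective: simpler.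

-- ===== PORT A =====
-- helper kaprekarf of A; Python pow(b, p) is b ^ p.toNat (Pre_ restricts to 0 ≤ p)
def kaprekarf (x : Int) (p : Int) (b : Int) : Int :=
  let beta := PySem.Int.mod (x ^ 2) (b ^ p.toNat)
  let alpha := PySem.Int.floordiv (x ^ 2 - beta) (b ^ p.toNat)
  alpha + beta

-- first while loop of A; the fuel only totalises the loop (it never changes the computed value on Pre_)
def kcLoop1 (p b : Int) : Nat → List Int → Int → List Int × Int
  | 0, seen, x => (seen, x)
  | fuel+1, seen, x =>
    if x < b ^ p.toNat ∧ x ∉ seen then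
      kcLoop1 p b fuel (seen ++ [x]) (kaprekarf x p b)
    else (seen, x)

-- second while loop of A
def kcLoop2 (p b : Int) : Nat → List Int → Int → List Int
  | 0, cycle, _ => cycle
  | fuel+1, cycle, x =>
    if x ∈ cycle then cycle
    else kcLoop2 p b fuel (cycle ++ [x]) (kaprekarf x p b)

def kaprekarf_cycle (x : Int) (p : Int) (b : Int) : List Int :=
  let fuel := (b ^ p.toNat).toNat + 2
  let s := kcLoop1 p b fuel [] x
  if s.2 > b ^ p.toNat then []
  else kcLoop2 p b fuel [] s.2

-- ===== PORT B =====
-- q, r = divmod(x * x, bound); x = q + r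
def kfB (x : Int) (bound : Int) : Int :=
  let q := PySem.Int.floordiv (x * x) bound
  let r := PySem.Int.mod (x * x) bound
  q + r

-- B's single recording loop (same totalising fuel)
def kcLoopB (bound : Int) : Nat → List Int → Int → List Int × Int
  | 0, seen, x => (seen, x)
  | fuel+1, seen, x =>
    if x < bound ∧ x ∉ seen then
      kcLoopB bound fuel (seen ++ [x]) (kfB x bound)
    else (seen, x)

def kaprekarf_cycle_alt (x : Int) (p : Int) (b : Int) : List Int :=
  let bound := b ^ p.toNat
  let s := kcLoopB bound (bound.toNat + 2) [] x
  if s.2 > bound then []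
  else if s.2 = bound then [bound]
  else s.1.drop ((PySem.List.index? s.1 s.2).getD 0)

-- ===== PRECONDITION & SPEC =====
-- Pre_ excludes p < 0, where Python's pow(b, p) is a float (comparisons and returned values leave the
-- int domain), and the inputs with b**p ≤ 0 on which A never returns: it diverges when x < b**p ≤ 0
-- and raises ZeroDivisionError when x = b**p = 0.
def Pre_kaprekarf_cycle (x : Int) (p : Int) (b : Int) : Prop :=
  0 ≤ p ∧ (0 < b ^ p.toNat ∨ b ^ p.toNat < x ∨ (b ^ p.toNat = x ∧ x ≠ 0))
instance (x : Int) (p : Int) (b : Int) : Decidable (Pre_kaprekarf_cycle x p b) := by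
  unfold Pre_kaprekarf_cycle; infer_instance
def pvWitness_kaprekarf_cycle : Int × Int × Int := (5, 2, 10)

def Spec_kaprekarf_cycle (x : Int) (p : Int) (b : Int) (out : List Int) : Prop := out = kaprekarf_cycle_alt x p b
instance (x : Int) (p : Int) (b : Int) (out : List Int) : Decidable (Spec_kaprekarf_cycle x p b out) := by unfold Spec_kaprekarf_cycle; infer_instance

-- ===== CLAIM (what is proved, stated in full; the proofs are below) =====
def Claim_equal_kaprekarf_cycle : Prop := ∀ (x : Int) (p : Int) (b : Int), Dom_kaprekarf_cycle x p b → Pre_kaprekarf_cycle x p b → Spec_kaprekarf_cycle x p b (kaprekarf_cycle x p b)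

-- ===== LEMMAS AND PROOFS =====

-- the two step functions agree
lemma kf_eq (x p b : Int) : kaprekarf x p b = kfB x (b ^ p.toNat) := by
  simp only [kaprekarf, kfB, pow_two]
  by_cases hm : (b ^ p.toNat) = 0
  · simp [hm, PySem.Int.mod, PySem.Int.floordiv, Int.fmod_zero]
  · have h1 : x * x - PySem.Int.mod (x * x) (b ^ p.toNat)
        = PySem.Int.floordiv (x * x) (b ^ p.toNat) * (b ^ p.toNat) := by
      have := PySem.Int.floordiv_mul_add_mod (x * x) (b ^ p.toNat); linarith
    rw [h1]
    have h2 : PySem.Int.floordiv (PySem.Int.floordiv (x * x) (b ^ p.toNat) * b ^ p.toNat) (b ^ p.toNat)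
        = PySem.Int.floordiv (x * x) (b ^ p.toNat) := by
      simp only [PySem.Int.floordiv]; exact Int.mul_fdiv_cancel _ hm
    rw [h2]

-- b**p is a fixed point of the step (for b**p ≠ 0): this justifies B's `[bound]` branch
lemma kf_fix (p b : Int) (hm : b ^ p.toNat ≠ 0) : kaprekarf (b ^ p.toNat) p b = b ^ p.toNat := by
  have hbeta : PySem.Int.mod ((b ^ p.toNat) * (b ^ p.toNat)) (b ^ p.toNat) = 0 :=
    (PySem.Int.mod_eq_zero_iff_dvd _ _).mpr (Dvd.intro _ rfl)
  simp only [kaprekarf, pow_two, hbeta, sub_zero, add_zero, PySem.Int.floordiv]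
  exact Int.mul_fdiv_cancel _ hm

lemma kfB_nonneg (x bound : Int) (hb : 0 < bound) : 0 ≤ kfB x bound := by
  simp only [kfB]
  have h1 : 0 ≤ PySem.Int.floordiv (x * x) bound := by
    rw [PySem.Int.floordiv_eq_ediv_of_pos hb]
    exact Int.ediv_nonneg (mul_self_nonneg x) hb.le
  have h2 := PySem.Int.mod_nonneg (x * x) hb
  linarith

-- the two recording loops agree step for step
lemma loops_eq (p b : Int) : ∀ (n : Nat) (seen : List Int) (x : Int),
    kcLoop1 p b n seen x = kcLoopB (b ^ p.toNat) n seen x := by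
  intro n
  induction n with
  | zero => intro seen x; rfl
  | succ n ih =>
    intro seen x
    rw [kcLoop1, kcLoopB]
    split_ifs with h
    · rw [kf_eq]; exact ih _ _
    · rfl

lemma kcLoopB_stop (bound : Int) (fuel : Nat) (seen : List Int) (x : Int)
    (h : ¬ (x < bound ∧ x ∉ seen)) : kcLoopB bound fuel seen x = (seen, x) := by
  cases fuel with
  | zero => rfl
  | succ n => rw [kcLoopB, if_neg h]

-- number of values of [0, bound) not yet recorded: the loop's termination measure
def muB (bound : Int) (seen : List Int) : Nat :=
  ((Finset.range bound.toNat).filter (fun k => ((k : Nat) : Int) ∉ seen)).card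

lemma muB_lt (bound : Int) (seen : List Int) (x : Int)
    (h0 : 0 ≤ x) (h1 : x < bound) (h2 : x ∉ seen) :
    muB bound (seen ++ [x]) < muB bound seen := by
  apply Finset.card_lt_card
  rw [Finset.ssubset_iff_of_subset]
  · refine ⟨x.toNat, ?_, ?_⟩
    · simp only [Finset.mem_filter, Finset.mem_range]
      exact ⟨by omega, by rw [Int.toNat_of_nonneg h0]; exact h2⟩
    · simp only [Finset.mem_filter, Finset.mem_range, not_and, not_not]
      intro _
      rw [Int.toNat_of_nonneg h0]
      simp
  · intro k hk
    simp only [Finset.mem_filter, Finset.mem_range, List.mem_append] at hk ⊢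
    exact ⟨hk.1, fun hmem => hk.2 (Or.inl hmem)⟩

-- with enough fuel the loop exits because the Python condition failed, never by fuel exhaustion
lemma kcLoopB_exit (bound : Int) (hb : 0 < bound) :
    ∀ (fuel : Nat) (seen : List Int) (x : Int), 0 ≤ x → muB bound seen + 1 ≤ fuel →
      ¬ ((kcLoopB bound fuel seen x).2 < bound ∧ (kcLoopB bound fuel seen x).2 ∉ (kcLoopB bound fuel seen x).1) := by
  intro fuel
  induction fuel with
  | zero => intro seen x h0 hf; omega
  | succ n ih =>
    intro seen x h0 hf
    rw [kcLoopB]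
    by_cases h : x < bound ∧ x ∉ seen
    · rw [if_pos h]
      exact ih _ _ (kfB_nonneg x bound hb)
        (by have := muB_lt bound seen x h0 h.1 h.2; omega)
    · rw [if_neg h]; exact h

-- loop invariants: recorded trajectory is a nodup kfB-chain, all below bound, tail nonnegative
lemma kcLoopB_inv (bound : Int) (hb : 0 < bound) :
    ∀ (fuel : Nat) (seen : List Int) (x : Int), seen.Nodup →
      List.IsChain (fun u v => v = kfB u bound) (seen ++ [x]) →
      (∀ y ∈ seen, y < bound) → (∀ y ∈ seen.tail, 0 ≤ y) → (0 ≤ x ∨ seen = []) →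
      ((kcLoopB bound fuel seen x).1.Nodup ∧
       List.IsChain (fun u v => v = kfB u bound)
         ((kcLoopB bound fuel seen x).1 ++ [(kcLoopB bound fuel seen x).2]) ∧
       (∀ y ∈ (kcLoopB bound fuel seen x).1, y < bound) ∧
       (∀ y ∈ (kcLoopB bound fuel seen x).1.tail, 0 ≤ y)) := by
  intro fuel
  induction fuel with
  | zero => intro seen x hnd hch hlt htl _; exact ⟨hnd, hch, hlt, htl⟩
  | succ n ih =>
    intro seen x hnd hch hlt htl hx
    rw [kcLoopB]
    by_cases h : x < bound ∧ x ∉ seen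
    · rw [if_pos h]
      refine ih (seen ++ [x]) (kfB x bound) ?_ ?_ ?_ ?_ (Or.inl (kfB_nonneg x bound hb))
      · rw [List.nodup_append]
        refine ⟨hnd, List.nodup_singleton x, ?_⟩
        intro a ha c hc
        simp only [List.mem_singleton] at hc
        subst hc
        exact fun hax => h.2 (hax ▸ ha)
      · rw [List.isChain_append]
        refine ⟨hch, by simp, ?_⟩
        intro a ha y hy
        rw [List.getLast?_concat] at ha
        simp only [Option.mem_def, Option.some.injEq, List.head?_cons] at ha hy
        subst ha
        exact hy.symm
      · intro y hy
        rcases List.mem_append.mp hy with h1 | h1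
        · exact hlt y h1
        · simp at h1; omega
      · intro y hy
        cases seen with
        | nil => simp at hy
        | cons a s =>
          simp only [List.cons_append, List.tail_cons] at hy
          rcases List.mem_append.mp hy with h1 | h1
          · exact htl y h1
          · simp at h1
            rcases hx with h2 | h2
            · omega
            · simp at h2
    · rw [if_neg h]; exact ⟨hnd, hch, hlt, htl⟩

-- a nodup list of integers in [0, m) has at most m.toNat elements
lemma nodup_bounded_length (l : List Int) (m : Int) (h : l.Nodup)
    (hb : ∀ y ∈ l, 0 ≤ y ∧ y < m) : l.length ≤ m.toNat := by
  have h1 : l.toFinset ⊆ Finset.Ico (0:Int) m := by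
    intro y hy
    rw [List.mem_toFinset] at hy
    rw [Finset.mem_Ico]
    exact hb y hy
  have h2 := Finset.card_le_card h1
  rw [List.toFinset_card_of_nodup h] at h2
  simpa [Int.card_Ico] using h2

-- A's second loop, run on a closed nodup cycle, returns exactly that cycle
lemma kcLoop2_run (p b : Int) (L : List Int) (hL : L ≠ []) (hnd : L.Nodup)
    (hchain : List.IsChain (fun u v => v = kaprekarf u p b) L)
    (hwrap : some (L.head hL) = L.getLast?.map (fun u => kaprekarf u p b)) :
    ∀ (rest done : List Int) (r : Int), L = done ++ r :: rest →
      ∀ (fuel : Nat), rest.length + 2 ≤ fuel → kcLoop2 p b fuel done r = L := by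
  intro rest
  induction rest with
  | nil =>
    intro done r hsplit fuel hfuel
    obtain ⟨n, rfl⟩ : ∃ n, fuel = n + 1 + 1 := ⟨fuel - 2, by omega⟩
    have hrd : r ∉ done := by
      have h1 := hnd
      rw [hsplit, List.nodup_append] at h1
      exact fun hc => h1.2.2 r hc r (by simp) rfl
    rw [kcLoop2, if_neg hrd]
    have hlast : L.getLast? = some r := by rw [hsplit]; exact List.getLast?_concat
    have hkr : kaprekarf r p b = L.head hL := by
      rw [hlast] at hwrap
      simp only [Option.map_some] at hwrap
      exact (Option.some_injective _ hwrap).symm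
    rw [hkr, kcLoop2, if_pos (by rw [← hsplit]; exact List.head_mem hL)]
    exact hsplit.symm
  | cons r' rest'' ih =>
    intro done r hsplit fuel hfuel
    obtain ⟨n, rfl⟩ : ∃ n, fuel = n + 1 := ⟨fuel - 1, by omega⟩
    have hrd : r ∉ done := by
      have h1 := hnd
      rw [hsplit, List.nodup_append] at h1
      exact fun hc => h1.2.2 r hc r (by simp) rfl
    rw [kcLoop2, if_neg hrd]
    have hstep : kaprekarf r p b = r' := by
      have hsub : List.IsChain (fun u v => v = kaprekarf u p b) (r :: r' :: rest'') :=
        hchain.suffix ⟨done, hsplit.symm⟩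
      exact ((List.isChain_cons_cons.mp hsub).1).symm
    rw [hstep]
    exact ih (done ++ [r]) r' (by rw [hsplit]; simp) n (by simp at hfuel ⊢; omega)

lemma loop2_fixpoint (p b : Int) (hm : b ^ p.toNat ≠ 0) (n : Nat) :
    kcLoop2 p b (n + 1 + 1) [] (b ^ p.toNat) = [b ^ p.toNat] := by
  rw [kcLoop2, if_neg (List.not_mem_nil), kf_fix p b hm, kcLoop2,
    if_pos (by simp : b ^ p.toNat ∈ [] ++ [b ^ p.toNat])]
  simp

theorem kc_main (x p b : Int)
    (_hp : 0 ≤ p)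
    (hpre2 : 0 < b ^ p.toNat ∨ b ^ p.toNat < x ∨ (b ^ p.toNat = x ∧ x ≠ 0)) :
    kaprekarf_cycle x p b = kaprekarf_cycle_alt x p b := by
  simp only [kaprekarf_cycle, kaprekarf_cycle_alt, loops_eq]
  set m := b ^ p.toNat with hmdef
  by_cases hb : 0 < m
  case neg =>
    -- m ≤ 0: the loop condition is false at once
    have hxm : m ≤ x := by
      rcases hpre2 with h | h | h
      · omega
      · omega
      · omega
    have hs : kcLoopB m (m.toNat + 2) [] x = ([], x) :=
      kcLoopB_stop _ _ _ _ (by intro hc; omega)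
    rw [hs]
    rcases eq_or_lt_of_le hxm with heq | hlt
    · have hx0 : x ≠ 0 := by
        rcases hpre2 with h | h | h
        · omega
        · omega
        · exact h.2
      rw [if_neg (by simp; omega), if_neg (by simp; omega), if_pos heq.symm]
      rw [← heq]
      exact loop2_fixpoint p b (by omega) m.toNat
    · rw [if_pos (by simpa using hlt), if_pos (by simpa using hlt)]
  case pos =>
    by_cases h0 : x < m ∧ x ∉ ([] : List Int)
    · -- the loop is entered once; then reason about the state ([x], kfB x m)
      have hunf : kcLoopB m (m.toNat + 2) [] x
          = kcLoopB m (m.toNat + 1) [x] (kfB x m) := by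
        rw [show m.toNat + 2 = (m.toNat + 1) + 1 from rfl, kcLoopB, if_pos h0]
        simp
      rw [hunf]
      set s := kcLoopB m (m.toNat + 1) [x] (kfB x m) with hsdef
      have hexit := kcLoopB_exit m hb (m.toNat + 1) [x] (kfB x m) (kfB_nonneg x m hb)
        (by
          have h1 : muB m [x] ≤ m.toNat := by
            have := Finset.card_filter_le (Finset.range m.toNat)
              (fun k => ((k : Nat) : Int) ∉ [x])
            simpa [muB] using this
          omega)
      have hinv := kcLoopB_inv m hb (m.toNat + 1) [x] (kfB x m)
        (List.nodup_singleton x)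
        (by
          rw [List.isChain_append]
          exact ⟨List.isChain_singleton _, List.isChain_singleton _, by simp⟩)
        (by simpa using h0.1)
        (by simp)
        (Or.inl (kfB_nonneg x m hb))
      rw [← hsdef] at hexit hinv
      obtain ⟨hnd, hchain, hlt, htail⟩ := hinv
      rcases lt_trichotomy s.2 m with hlt2 | heq2 | hgt2
      · -- s.2 < m : the loop stopped on the repeat; cycle = recorded suffix
        have hxin : s.2 ∈ s.1 := by
          by_contra hc
          exact hexit ⟨hlt2, hc⟩
        rw [if_neg (by omega), if_neg (by omega), if_neg (by omega)]
        have hsome : (PySem.List.index? s.1 s.2).isSome :=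
          (PySem.List.index?_isSome_iff _ _).mpr hxin
        obtain ⟨k, hk⟩ := Option.isSome_iff_exists.mp hsome
        obtain ⟨pre, suf, hsplit, hklen, hnpre⟩ :=
          (PySem.List.index?_eq_some_iff _ _ _).mp hk
        rw [hk]
        simp only [Option.getD_some]
        have hdrop : s.1.drop k = s.2 :: suf := by
          rw [hsplit, ← hklen]
          exact List.drop_left
        rw [hdrop]
        -- chain facts for the cycle L = s.2 :: suf
        have hLsuffix : ((s.2 :: suf) ++ [s.2]) <:+ (s.1 ++ [s.2]) :=
          ⟨pre, by rw [hsplit]; simp⟩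
        have hchainA : List.IsChain (fun u v => v = kaprekarf u p b) ((s.2 :: suf) ++ [s.2]) := by
          refine (hchain.suffix hLsuffix).imp ?_
          intro a c hac
          rw [kf_eq]
          exact hac
        obtain ⟨hcL, -, hlastr⟩ := List.isChain_append.mp hchainA
        have hndL : (s.2 :: suf).Nodup := by
          have h1 := hnd
          rw [hsplit, List.nodup_append] at h1
          exact h1.2.1
        have hgl : (s.2 :: suf).getLast? = some ((s.2 :: suf).getLast (by simp)) :=
          List.getLast?_eq_some_getLast _
        have hwrap : some ((s.2 :: suf).head (by simp))
            = (s.2 :: suf).getLast?.map (fun u => kaprekarf u p b) := by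
          rw [hgl]
          simp only [Option.map_some, List.head_cons, Option.some.injEq]
          exact hlastr _ (by rw [hgl]; rfl) s.2 rfl
        -- fuel bound: suf.length + 2 ≤ m.toNat + 2
        have htlen : s.1.tail.length ≤ m.toNat := by
          refine nodup_bounded_length _ m ((List.tail_sublist s.1).nodup hnd) ?_
          intro y hy
          exact ⟨htail y hy, hlt y (List.mem_of_mem_tail hy)⟩
        have hslen : suf.length ≤ s.1.tail.length := by
          have h1 : s.1.length = pre.length + (suf.length + 1) := by
            rw [hsplit]; simp
          have h2 : s.1.tail.length = s.1.length - 1 := List.length_tail ..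
          omega
        exact kcLoop2_run p b (s.2 :: suf) (by simp) hndL hcL hwrap suf [] s.2 rfl
          (m.toNat + 2) (by omega)
      · -- s.2 = m : fixed point
        rw [if_neg (by omega), if_neg (by omega), if_pos heq2, heq2]
        exact loop2_fixpoint p b (by omega) m.toNat
      · rw [if_pos (by omega), if_pos (by omega)]
    · -- loop not entered
      have hs := kcLoopB_stop m (m.toNat + 2) [] x h0
      rw [hs]
      have hxm : m ≤ x := by
        simp only [List.not_mem_nil, not_false_iff, and_true, not_lt] at h0
        exact h0
      rcases eq_or_lt_of_le hxm with heq | hlt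
      · rw [if_neg (by simp; omega), if_neg (by simp; omega), if_pos heq.symm, ← heq]
        exact loop2_fixpoint p b (by omega) m.toNat
      · rw [if_pos (by simpa using hlt), if_pos (by simpa using hlt)]

-- ===== VERDICT (by name: the statement is the Claim_ definition above) =====
theorem kaprekarf_cycle_spec : Claim_equal_kaprekarf_cycle := by
  intro x p b _ hpre
  unfold Spec_kaprekarf_cycle
  exact kc_main x p b hpre.1 hpre.2
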